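-- pv_equiv track=rewrite | github.com/Shaun2016/GraphSearch | model/Graph.py | get_splite_char
-- ===== SOURCE A (Python) =====
-- def get_splite_char(line):
--     res = ''
--     for i in range(len(line)):
--         if '0' <= line[i] <= '9' or line[i] == '#':
--             continue
--         for j in range(i, len(line)):
--             if '0' <= line[j] <= '9' or line[j] == '#':
--                 break
--             res += line[j]
--         return res
-- ===== SOURCE B (Python) =====
-- import re
--
-- def get_splite_char(line):
--     m = re.search(r'[^0-9#]+', line)
--     return m.group() if m else None
-- ===== Notes on version B (the rewrite author's own statement) =====
-- stated objective: idiomatic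
-- what changed: Replaces the nested index scan that builds the result by repeated string concatenation with a single regex search for the first maximal run of non-digit, non-'#' characters.
-- outside the precondition, e.g. on get_splite_char('#'): A returns None, B returns None; on get_splite_char('123#'): A returns None, B returns None
import Mathlib
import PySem

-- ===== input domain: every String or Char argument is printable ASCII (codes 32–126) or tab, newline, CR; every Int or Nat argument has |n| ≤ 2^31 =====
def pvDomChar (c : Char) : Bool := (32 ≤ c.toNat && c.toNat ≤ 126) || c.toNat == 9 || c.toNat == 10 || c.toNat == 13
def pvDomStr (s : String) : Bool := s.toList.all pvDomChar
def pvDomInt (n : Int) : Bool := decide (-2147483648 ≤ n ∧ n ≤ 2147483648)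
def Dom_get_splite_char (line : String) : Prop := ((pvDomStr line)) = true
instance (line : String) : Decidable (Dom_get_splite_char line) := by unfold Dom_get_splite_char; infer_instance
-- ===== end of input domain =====

-- B replaces A's nested index scan by a regex search for the first run of non-digit,
-- non-'#' characters (objective: idiomatic).

-- ===== PORT A =====
-- the condition of both of A's `if`s: '0' <= c <= '9' or c == '#'
def pvStop (c : Char) : Bool := ('0' ≤ c && c ≤ '9') || c == '#'

-- A's inner loop: for j in range(i, len(line)): break on stop, else res += line[j]; then return res
def pvAInner : List Char → String → String
  | [], res => res
  | c :: cs, res => if pvStop c then res else pvAInner cs (res ++ String.ofList [c])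

-- A's outer loop: skip (continue) while stop; on the first non-stop char run the inner loop and return
def pvAOuter : List Char → String
  | [] => ""  -- fall-through (Python returns None); excluded by Pre_get_splite_char
  | c :: cs => if pvStop c then pvAOuter cs else pvAInner (c :: cs) ""

def get_splite_char (line : String) : String := pvAOuter line.toList

-- ===== PORT B =====
-- hand port of re.search(r'[^0-9#]+', line): the regex engine skips the longest prefix of
-- characters in [0-9#], then captures the maximal run of characters outside [0-9#]; exact
-- on ASCII input. The no-match (None) case is outside Pre_get_splite_char.
-- the regex character class [^0-9#]
def pvSep (c : Char) : Bool := !(('0' ≤ c && c ≤ '9') || c == '#')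

def get_splite_char_alt (line : String) : String :=
  String.ofList ((line.toList.dropWhile (fun c => !pvSep c)).takeWhile pvSep)

-- ===== PRECONDITION & SPEC =====
-- Pre_ excludes inputs (empty or all digits/'#') on which A falls through and returns None,
-- which is not a str; B returns None there too.
def Pre_get_splite_char (line : String) : Prop :=
  (line.toList.any (fun c => !pvStop c)) = true
instance (line : String) : Decidable (Pre_get_splite_char line) := by
  unfold Pre_get_splite_char; infer_instance

def pvWitness_get_splite_char : String := "12#ab3"

def Spec_get_splite_char (line : String) (out : String) : Prop := out = get_splite_char_alt line
instance (line : String) (out : String) : Decidable (Spec_get_splite_char line out) := by unfold Spec_get_splite_char; infer_instance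

-- ===== CLAIM (what is proved, stated in full; the proofs are below) =====
def Claim_equal_get_splite_char : Prop := ∀ (line : String), Dom_get_splite_char line → Pre_get_splite_char line → Spec_get_splite_char line (get_splite_char line)

-- ===== LEMMAS AND PROOFS =====
theorem pvAInner_eq (cs : List Char) (res : String) :
    pvAInner cs res = res ++ String.ofList (cs.takeWhile (fun c => !pvStop c)) := by
  induction cs generalizing res with
  | nil => simp [pvAInner]
  | cons c cs ih =>
    by_cases h : pvStop c = true
    · simp [pvAInner, List.takeWhile, h]
    · have hb : pvStop c = false := by simpa using h
      simp only [pvAInner, List.takeWhile, hb, Bool.not_false, if_false, ite_true]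
      rw [ih]
      apply String.toList_inj.mp
      simp

theorem pvAOuter_eq (cs : List Char) (h : cs.any (fun c => !pvStop c) = true) :
    pvAOuter cs = String.ofList ((cs.dropWhile pvStop).takeWhile (fun c => !pvStop c)) := by
  induction cs with
  | nil => simp at h
  | cons c cs ih =>
    by_cases hc : pvStop c = true
    · have h' : cs.any (fun c => !pvStop c) = true := by
        simp [List.any_cons, hc] at h; simpa using h
      simp [pvAOuter, List.dropWhile, hc, ih h']
    · simp [pvAOuter, List.dropWhile, hc, pvAInner_eq]

-- ===== VERDICT (by name: the statement is the Claim_ definition above) =====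
theorem get_splite_char_spec : Claim_equal_get_splite_char := by
  intro line _ hpre
  unfold Spec_get_splite_char get_splite_char get_splite_char_alt
  rw [pvAOuter_eq _ hpre,
      show (fun c => !pvSep c) = pvStop from funext fun c => by simp [pvSep, pvStop],
      show pvSep = (fun c => !pvStop c) from funext fun c => rfl]
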